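-- pv_equiv track=rewrite | github.com/LegionMG/sci_code | codewalks.py | get_fibonacchi_codewalk
-- ===== SOURCE A (Python) =====
-- def get_fibonacchi_codewalk(number, depth):
-- 	starts = [("2","1"),("3","1"),("3","2")]
-- 	replace = dict()
-- 	replace[starts[number][0]] = starts[number][0]+starts[number][1]
-- 	replace[starts[number][1]] = starts[number][0]
-- 	this_iter = starts[number][1]
-- 	for i in range(depth):
-- 		new_iter = "".join([replace[x] for x in this_iter])
-- 		this_iter = new_iter
-- 	return this_iter
-- ===== SOURCE B (Python) =====
-- def get_fibonacchi_codewalk(number, depth):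
--     starts = [("2","1"),("3","1"),("3","2")]
--     x, y = starts[number]
--     if depth <= 0:
--         return y
--     prev, cur = y, x
--     for _ in range(depth - 1):
--         prev, cur = cur, cur + prev
--     return cur
-- ===== Notes on version B (the rewrite author's own statement) =====
-- stated objective: faster
-- what changed: Replaces the per-character substitution loop (dict lookup and join over every character, each iteration) with the Fibonacci-word concatenation recurrence f(n)=f(n-1)+f(n-2), keeping two strings and doing one concatenation per iteration.
import Mathlib
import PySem

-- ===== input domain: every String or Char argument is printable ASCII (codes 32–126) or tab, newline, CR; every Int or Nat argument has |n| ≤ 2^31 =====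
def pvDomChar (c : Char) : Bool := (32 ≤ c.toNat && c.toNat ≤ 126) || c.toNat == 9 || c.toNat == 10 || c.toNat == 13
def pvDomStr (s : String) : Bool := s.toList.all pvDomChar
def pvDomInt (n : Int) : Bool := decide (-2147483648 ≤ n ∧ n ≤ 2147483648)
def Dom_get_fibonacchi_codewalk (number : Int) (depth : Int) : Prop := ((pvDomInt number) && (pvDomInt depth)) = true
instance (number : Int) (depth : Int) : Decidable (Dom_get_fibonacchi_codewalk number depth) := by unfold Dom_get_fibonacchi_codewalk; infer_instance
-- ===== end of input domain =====

-- B replaces A's per-character substitution pass (dict lookup + join each iteration) with the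
-- Fibonacci-word concatenation recurrence f(n) = f(n-1) + f(n-2): one concatenation per iteration.

-- ===== PORT A =====
-- A's loop body: "".join([replace[x] for x in this_iter]). On every input admitted by
-- Pre_ the key is always present (the word only contains the two dict keys), so the
-- total lookup `getD _ ""` computes exactly Python's replace[x] there.
def pvStepA (replace : PySem.Dict String String) (s : String) : String :=
  PySem.Str.join "" (s.toList.map (fun c => replace.getD (String.ofList [c]) ""))

def get_fibonacchi_codewalk (number : Int) (depth : Int) : String :=
  let starts : List (String × String) := [("2","1"),("3","1"),("3","2")]
  match PySem.List.pyGet? starts number with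
  | none => ""  -- starts[number] raises IndexError in Python; excluded by Pre_
  | some st =>
    let replace : PySem.Dict String String :=
      ((PySem.Dict.empty).insert st.1 (st.1 ++ st.2)).insert st.2 st.1
    (PySem.List.pyRange 0 depth 1).foldl (fun this_iter _ => pvStepA replace this_iter) st.2

-- ===== PORT B =====
def get_fibonacchi_codewalk_alt (number : Int) (depth : Int) : String :=
  let starts : List (String × String) := [("2","1"),("3","1"),("3","2")]
  match PySem.List.pyGet? starts number with
  | none => ""  -- starts[number] raises IndexError in Python (B too); excluded by Pre_
  | some st =>
    if depth ≤ 0 then st.2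
    else ((PySem.List.pyRange 0 (depth - 1) 1).foldl
            (fun (pc : String × String) _ => (pc.2, pc.2 ++ pc.1)) (st.2, st.1)).2

-- ===== PRECONDITION & SPEC =====
-- Pre_ excludes exactly the indices where starts[number] raises IndexError (both A and B raise there).
def Pre_get_fibonacchi_codewalk (number : Int) (_depth : Int) : Prop := -3 ≤ number ∧ number < 3
instance (number : Int) (depth : Int) : Decidable (Pre_get_fibonacchi_codewalk number depth) := by unfold Pre_get_fibonacchi_codewalk; infer_instance
def pvWitness_get_fibonacchi_codewalk : Int × Int := (0, 4)

def Spec_get_fibonacchi_codewalk (number : Int) (depth : Int) (out : String) : Prop := out = get_fibonacchi_codewalk_alt number depth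
instance (number : Int) (depth : Int) (out : String) : Decidable (Spec_get_fibonacchi_codewalk number depth out) := by unfold Spec_get_fibonacchi_codewalk; infer_instance

-- ===== CLAIM (what is proved, stated in full; the proofs are below) =====
def Claim_equal_get_fibonacchi_codewalk : Prop := ∀ (number : Int) (depth : Int), Dom_get_fibonacchi_codewalk number depth → Pre_get_fibonacchi_codewalk number depth → Spec_get_fibonacchi_codewalk number depth (get_fibonacchi_codewalk number depth)

-- ===== LEMMAS AND PROOFS =====

-- the Fibonacci word over letters a (the "x" start) and b (the "y" start)
def pvFw (a b : Char) : Nat → List Char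
  | 0 => [b]
  | 1 => [a]
  | n + 2 => pvFw a b (n + 1) ++ pvFw a b n

-- the substitution a ↦ ab, b ↦ a, on words over {a, b}
def pvSub (a b : Char) (l : List Char) : List Char :=
  l.flatMap (fun c => if c = a then [a, b] else [a])

lemma pvJoinNil (xss : List (List Char)) : PySem.Chars.join [] xss = xss.flatten := by
  induction xss with
  | nil => simp [PySem.Chars.join_nil]
  | cons x xs ih =>
    cases xs with
    | nil => simp [PySem.Chars.join_singleton]
    | cons y ys => rw [PySem.Chars.join_cons_cons] at *; simp_all

lemma pvFoldl_const {α β : Type} (g : β → β) :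
    ∀ (l : List α) (init : β), l.foldl (fun s _ => g s) init = g^[l.length] init := by
  intro l
  induction l with
  | nil => intro init; simp
  | cons x xs ih =>
    intro init
    simp only [List.foldl_cons, List.length_cons, ih, Function.iterate_succ_apply]

lemma pvFw_add2 (a b : Char) (n : Nat) :
    pvFw a b (n + 2) = pvFw a b (n + 1) ++ pvFw a b n := by
  rw [pvFw]

lemma pvSub_append (a b : Char) (l₁ l₂ : List Char) :
    pvSub a b (l₁ ++ l₂) = pvSub a b l₁ ++ pvSub a b l₂ := by
  simp [pvSub]

lemma pvSub_fw (a b : Char) (hab : a ≠ b) :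
    ∀ n, pvSub a b (pvFw a b n) = pvFw a b (n + 1) := by
  intro n
  induction n using Nat.strong_induction_on with
  | _ n ih =>
    match n with
    | 0 => simp [pvFw, pvSub, Ne.symm hab]
    | 1 => simp [pvFw, pvSub]
    | (m + 2) =>
      rw [pvFw_add2, pvSub_append, ih (m + 1) (by omega), ih m (by omega)]
      exact (pvFw_add2 a b (m + 1)).symm

lemma pvFw_mem (a b : Char) : ∀ n, ∀ c ∈ pvFw a b n, c = a ∨ c = b := by
  intro n
  induction n using Nat.strong_induction_on with
  | _ n ih =>
    match n with
    | 0 => simp [pvFw]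
    | 1 => simp [pvFw]
    | (m + 2) =>
      rw [pvFw_add2]
      intro c hc
      rcases List.mem_append.mp hc with h | h
      · exact ih (m + 1) (by omega) c h
      · exact ih m (by omega) c h

lemma pvStepA_toList (X Y : String) (a b : Char)
    (hX : X.toList = [a]) (hY : Y.toList = [b]) (hab : a ≠ b) (s : String)
    (hs : ∀ c ∈ s.toList, c = a ∨ c = b) :
    (pvStepA (((PySem.Dict.empty).insert X (X ++ Y)).insert Y X) s).toList
      = pvSub a b s.toList := by
  have hXo : X = String.ofList [a] := by rw [← hX, String.ofList_toList]
  have hYo : Y = String.ofList [b] := by rw [← hY, String.ofList_toList]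
  unfold pvStepA pvSub
  have h0 : ("" : String).toList = ([] : List Char) := rfl
  rw [PySem.Str.toList_join, List.map_map, h0, pvJoinNil, List.flatMap_def]
  congr 1
  apply List.map_congr_left
  intro c hc
  rcases hs c hc with rfl | rfl
  · have hne : String.ofList [c] ≠ Y := by
      intro h; apply hab
      have := congrArg String.toList h
      rw [String.toList_ofList, hY] at this
      injection this
    rw [Function.comp_apply, PySem.Dict.getD_insert, if_neg hne,
      PySem.Dict.getD_insert, if_pos hXo.symm, String.toList_append, hX, hY]
    simp
  · rw [Function.comp_apply, PySem.Dict.getD_insert, if_pos hYo.symm, hX]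
    simp [Ne.symm hab]

lemma pvA_iter (X Y : String) (a b : Char)
    (hX : X.toList = [a]) (hY : Y.toList = [b]) (hab : a ≠ b) :
    ∀ n, ((pvStepA (((PySem.Dict.empty).insert X (X ++ Y)).insert Y X))^[n] Y).toList
      = pvFw a b n := by
  intro n
  induction n with
  | zero => simpa [pvFw] using hY
  | succ m ih =>
    rw [Function.iterate_succ_apply',
      pvStepA_toList X Y a b hX hY hab _ (by rw [ih]; exact pvFw_mem a b m), ih,
      pvSub_fw a b hab]

lemma pvB_iter (X Y : String) (a b : Char)
    (hX : X.toList = [a]) (hY : Y.toList = [b]) :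
    ∀ n, (((fun pc : String × String => (pc.2, pc.2 ++ pc.1))^[n] (Y, X)).1.toList
            = pvFw a b n)
       ∧ (((fun pc : String × String => (pc.2, pc.2 ++ pc.1))^[n] (Y, X)).2.toList
            = pvFw a b (n + 1)) := by
  intro n
  induction n with
  | zero => exact ⟨by simpa [pvFw] using hY, by simpa [pvFw] using hX⟩
  | succ m ih =>
    simp only [Function.iterate_succ_apply']
    refine ⟨ih.2, ?_⟩
    rw [String.toList_append, ih.2, ih.1]
    exact (pvFw_add2 a b m).symm

lemma pvCore (X Y : String) (a b : Char)
    (hX : X.toList = [a]) (hY : Y.toList = [b]) (hab : a ≠ b) (depth : Int) :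
    (PySem.List.pyRange 0 depth 1).foldl
      (fun this_iter _ =>
        pvStepA (((PySem.Dict.empty).insert X (X ++ Y)).insert Y X) this_iter) Y
    = (if depth ≤ 0 then Y
       else ((PySem.List.pyRange 0 (depth - 1) 1).foldl
              (fun (pc : String × String) _ => (pc.2, pc.2 ++ pc.1)) (Y, X)).2) := by
  rw [pvFoldl_const, pvFoldl_const, PySem.List.length_pyRange_one,
    PySem.List.length_pyRange_one]
  split_ifs with h
  · have : (depth - 0).toNat = 0 := by omega
    rw [this]; rfl
  · apply String.toList_injective
    rw [pvA_iter X Y a b hX hY hab, (pvB_iter X Y a b hX hY _).2]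
    congr 1
    omega

-- ===== VERDICT (by name: the statement is the Claim_ definition above) =====
theorem get_fibonacchi_codewalk_spec : Claim_equal_get_fibonacchi_codewalk := by
  intro number depth _ hpre
  obtain ⟨h1, h2⟩ := hpre
  unfold Spec_get_fibonacchi_codewalk get_fibonacchi_codewalk get_fibonacchi_codewalk_alt
  interval_cases number
  · have e : PySem.List.pyGet? ([("2","1"),("3","1"),("3","2")] : List (String × String)) (-3) = some ("2","1") := by decide
    simp only [e]
    exact pvCore "2" "1" '2' '1' rfl rfl (by decide) depth
  · have e : PySem.List.pyGet? ([("2","1"),("3","1"),("3","2")] : List (String × String)) (-2) = some ("3","1") := by decide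
    simp only [e]
    exact pvCore "3" "1" '3' '1' rfl rfl (by decide) depth
  · have e : PySem.List.pyGet? ([("2","1"),("3","1"),("3","2")] : List (String × String)) (-1) = some ("3","2") := by decide
    simp only [e]
    exact pvCore "3" "2" '3' '2' rfl rfl (by decide) depth
  · have e : PySem.List.pyGet? ([("2","1"),("3","1"),("3","2")] : List (String × String)) (0) = some ("2","1") := by decide
    simp only [e]
    exact pvCore "2" "1" '2' '1' rfl rfl (by decide) depth
  · have e : PySem.List.pyGet? ([("2","1"),("3","1"),("3","2")] : List (String × String)) (1) = some ("3","1") := by decide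
    simp only [e]
    exact pvCore "3" "1" '3' '1' rfl rfl (by decide) depth
  · have e : PySem.List.pyGet? ([("2","1"),("3","1"),("3","2")] : List (String × String)) (2) = some ("3","2") := by decide
    simp only [e]
    exact pvCore "3" "2" '3' '2' rfl rfl (by decide) depth
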